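-- pv_equiv track=rewrite | github.com/aislinnkeogh/aoc2025 | code/script/day05.py | solve
-- ===== SOURCE A (Python) =====
-- import bisect
--
-- def in_ranges(n, ranges, startpoints):
--     i = bisect.bisect_right(startpoints, n) - 1 # bisect_right --> where would we have to insert this number to preserve the order? need to check the range at the index before this
--     if i >= 0:
--         return ranges[i][0] <= n <= ranges[i][1]
--     return False
--
-- def solve(ranges, ids):
--     ranges.sort(key=lambda r: r[0]) # sort by start so we only have to compare each range against the previous one to see if there's any overlap
--     merged_ranges = [ranges[0]]
--     for start, stop in ranges[1:]:
--         if start > merged_ranges[-1][1] + 1: # no overlap, append this range to the list as is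
--             merged_ranges.append([start, stop])
--         else: # overlap: set the end point of the previous range to whichever is higher out of it and the end point of the current range
--             merged_ranges[-1][1] = max(merged_ranges[-1][1], stop)
--     startpoints = [r[0] for r in merged_ranges]
--     part1 = sum(in_ranges(ingredient, merged_ranges, startpoints) for ingredient in ids)
--     part2 = sum(stop - start + 1 for start, stop in merged_ranges)
--     return part1, part2
-- ===== SOURCE B (Python) =====
-- def solve(ranges, ids):
--     # Return-value equivalent to A; unlike A it does not sort `ranges` in
--     # place nor mutate its inner lists (equivalence is about the return value).
--     merged = []  # list of (lo, hi) tuples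
--     for r in sorted(ranges, key=lambda r: r[0]):
--         lo, hi = r[0], r[1]
--         if merged and lo <= merged[-1][1] + 1:
--             plo, phi = merged[-1]
--             merged[-1] = (plo, max(phi, hi))
--         else:
--             merged.append((lo, hi))
--     part1 = len([n for n in ids if any(lo <= n <= hi for lo, hi in merged)])
--     part2 = sum(hi - lo + 1 for lo, hi in merged)
--     return part1, part2
-- ===== Notes on version B (the rewrite author's own statement) =====
-- stated objective: simpler
-- what changed: part1 drops the bisect binary search and its startpoints index in favour of a direct containment scan over the merged ranges, and the merge builds immutable (lo, hi) pairs over a sorted copy instead of mutating the input's inner lists in place.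
import Mathlib
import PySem

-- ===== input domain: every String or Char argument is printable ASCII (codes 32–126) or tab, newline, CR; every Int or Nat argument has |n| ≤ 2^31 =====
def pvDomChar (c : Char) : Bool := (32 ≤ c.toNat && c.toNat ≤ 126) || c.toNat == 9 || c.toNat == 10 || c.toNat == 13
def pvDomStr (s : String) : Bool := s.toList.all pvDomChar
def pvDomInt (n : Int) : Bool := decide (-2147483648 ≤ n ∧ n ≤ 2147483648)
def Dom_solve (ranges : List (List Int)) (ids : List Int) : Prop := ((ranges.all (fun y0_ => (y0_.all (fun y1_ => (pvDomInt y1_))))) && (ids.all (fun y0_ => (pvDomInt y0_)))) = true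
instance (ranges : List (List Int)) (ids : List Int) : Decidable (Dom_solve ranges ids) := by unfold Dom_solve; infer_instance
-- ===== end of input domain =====

-- B replaces the per-id binary search (bisect + startpoints index) by a direct
-- containment scan of the merged ranges and builds the merge with immutable pairs;
-- equivalence is about the RETURN value only (A sorts `ranges` in place and mutates
-- its inner lists through aliasing, B does not mutate its arguments).

-- ===== PORT A =====
-- port of in_ranges; bisect.bisect_right is ported as PySem.List.bisectRight.
-- ranges[i][0] / ranges[i][1] are read with pyGetD (exact under Pre_solve: rows
-- have length 2 and i is always in range there).
def inRangesA (n : Int) (ranges : List (List Int)) (startpoints : List Int) : Bool :=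
  let i : Int := (PySem.List.bisectRight startpoints n : Int) - 1
  if 0 ≤ i then
    match PySem.List.pyGet? ranges i with
    | some r => decide (PySem.List.pyGetD r 0 0 ≤ n) && decide (n ≤ PySem.List.pyGetD r 1 0)
    | none => false
  else false

-- one iteration of A's merge loop; the accumulator holds merged_ranges in REVERSE
-- (head = merged_ranges[-1]), so appending is cons and mutating the last entry is
-- replacing the head.  `for start, stop in …` is the two pyGetD reads (rows have
-- length 2 under Pre_solve).
def mergeStepA (acc : List (List Int)) (r : List Int) : List (List Int) :=
  let start := PySem.List.pyGetD r 0 0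
  let stop  := PySem.List.pyGetD r 1 0
  match acc with
  | m :: ms =>
      if PySem.List.pyGetD m 1 0 + 1 < start then
        [start, stop] :: m :: ms
      else
        [PySem.List.pyGetD m 0 0, max (PySem.List.pyGetD m 1 0) stop] :: ms
  | [] => [[start, stop]]

def solve (ranges : List (List Int)) (ids : List Int) : Int × Int :=
  let rs := PySem.List.sorted ranges (fun r => PySem.List.pyGetD r 0 0)
  match rs with
  | [] => (0, 0)   -- Python raises IndexError on ranges[0] here; excluded by Pre_solve
  | r0 :: rest =>
    let merged := (rest.foldl mergeStepA [r0]).reverse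
    let startpoints := merged.map (fun r => PySem.List.pyGetD r 0 0)
    let part1 := (ids.map (fun n => if inRangesA n merged startpoints then (1 : Int) else 0)).sum
    let part2 := (merged.map (fun r => PySem.List.pyGetD r 1 0 - PySem.List.pyGetD r 0 0 + 1)).sum
    (part1, part2)

-- ===== PORT B =====
-- `any(lo <= n <= hi for lo, hi in merged)`
def containsB (merged : List (Int × Int)) (n : Int) : Bool :=
  merged.any (fun p => decide (p.1 ≤ n) && decide (n ≤ p.2))

-- one iteration of B's merge loop (accumulator reversed, head = merged[-1]);
-- r[0] / r[1] are the two pyGetD reads (rows have length 2 under Pre_solve)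
def mergeStepB (acc : List (Int × Int)) (r : List Int) : List (Int × Int) :=
  let lo := PySem.List.pyGetD r 0 0
  let hi := PySem.List.pyGetD r 1 0
  match acc with
  | p :: ms => if lo ≤ p.2 + 1 then (p.1, max p.2 hi) :: ms else (lo, hi) :: p :: ms
  | [] => [(lo, hi)]

def solve_alt (ranges : List (List Int)) (ids : List Int) : Int × Int :=
  let merged := ((PySem.List.sorted ranges (fun r => PySem.List.pyGetD r 0 0)).foldl mergeStepB []).reverse
  (((ids.filter (fun n => containsB merged n)).length : Int),
   (merged.map (fun p => p.2 - p.1 + 1)).sum)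

-- ===== PRECONDITION & SPEC =====
-- exactly the inputs on which Python A returns: a nonempty list of rows of length 2
-- (on [] A's ranges[0] raises IndexError; a row of another length raises in the sort
-- key, the tuple unpacking, or in_ranges)
def Pre_solve (ranges : List (List Int)) (_ids : List Int) : Prop :=
  ranges ≠ [] ∧ ∀ r ∈ ranges, r.length = 2
instance (ranges : List (List Int)) (ids : List Int) : Decidable (Pre_solve ranges ids) := by
  unfold Pre_solve; infer_instance
def pvWitness_solve : List (List Int) × List Int := ([[3, 5], [1, 2], [9, 9]], [2, 6, 9])

def Spec_solve (ranges : List (List Int)) (ids : List Int) (out : Int × Int) : Prop := out = solve_alt ranges ids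
instance (ranges : List (List Int)) (ids : List Int) (out : Int × Int) : Decidable (Spec_solve ranges ids out) := by unfold Spec_solve; infer_instance

-- ===== CLAIM (what is proved, stated in full; the proofs are below) =====
def Claim_equal_solve : Prop := ∀ (ranges : List (List Int)) (ids : List Int), Dom_solve ranges ids → Pre_solve ranges ids → Spec_solve ranges ids (solve ranges ids)

-- ===== LEMMAS AND PROOFS =====

-- the (start, stop) view of a row, i.e. what both merge loops read from it
def rowPair (r : List Int) : Int × Int := (PySem.List.pyGetD r 0 0, PySem.List.pyGetD r 1 0)

-- A's merge step, seen through rowPair, is B's merge step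
theorem mergeStep_corr (acc : List (List Int)) (r : List Int) :
    (mergeStepA acc r).map rowPair = mergeStepB (acc.map rowPair) r := by
  cases acc with
  | nil => simp [mergeStepA, mergeStepB, rowPair, PySem.List.pyGetD]
  | cons m ms =>
    simp only [mergeStepA, mergeStepB, List.map_cons]
    by_cases h : PySem.List.pyGetD m 1 0 + 1 < PySem.List.pyGetD r 0 0
    · rw [if_pos h, if_neg (by simp [rowPair]; omega)]
      simp [rowPair, PySem.List.pyGetD]
    · rw [if_neg h, if_pos (by simp [rowPair]; omega)]
      simp [rowPair, PySem.List.pyGetD]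

theorem mergeFold_corr (rest : List (List Int)) (acc : List (List Int)) :
    (rest.foldl mergeStepA acc).map rowPair = rest.foldl mergeStepB (acc.map rowPair) := by
  induction rest generalizing acc with
  | nil => rfl
  | cons x xs ih => simp only [List.foldl_cons, ih, mergeStep_corr]

-- the invariant of the (reversed) merge accumulator
def accQ (a b : Int × Int) : Prop := b.1 ≤ a.1 ∧ b.2 + 1 < a.1

theorem mergeFold_inv (inputs : List (List Int)) (acc : List (Int × Int))
    (hs : List.Pairwise (fun a b => PySem.List.pyGetD a 0 0 ≤ PySem.List.pyGetD b 0 0) inputs)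
    (hb : ∀ a ∈ acc, ∀ x ∈ inputs, a.1 ≤ PySem.List.pyGetD x 0 0)
    (hq : List.Pairwise accQ acc) :
    List.Pairwise accQ (inputs.foldl mergeStepB acc) := by
  induction inputs generalizing acc with
  | nil => exact hq
  | cons x xs ih =>
    rcases List.pairwise_cons.mp hs with ⟨hx, hxs⟩
    simp only [List.foldl_cons]
    cases acc with
    | nil =>
      refine ih _ hxs ?_ (by simp [mergeStepB])
      intro a ha y hy
      simp [mergeStepB] at ha
      subst ha
      exact hx y hy
    | cons p ms =>
      rcases List.pairwise_cons.mp hq with ⟨hp, hms⟩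
      by_cases h : PySem.List.pyGetD x 0 0 ≤ p.2 + 1
      · have hstep : mergeStepB (p :: ms) x = (p.1, max p.2 (PySem.List.pyGetD x 1 0)) :: ms := by
          simp [mergeStepB, h]
        rw [hstep]
        refine ih _ hxs ?_ ?_
        · intro a ha y hy
          rcases List.mem_cons.mp ha with ha | ha
          · subst ha
            exact hb p (List.mem_cons_self) y (List.mem_cons_of_mem _ hy)
          · exact hb a (List.mem_cons_of_mem _ ha) y (List.mem_cons_of_mem _ hy)
        · exact List.pairwise_cons.mpr ⟨fun b hbm => hp b hbm, hms⟩
      · have hstep : mergeStepB (p :: ms) x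
            = (PySem.List.pyGetD x 0 0, PySem.List.pyGetD x 1 0) :: p :: ms := by
          simp [mergeStepB, h]
        rw [hstep]
        refine ih _ hxs ?_ ?_
        · intro a ha y hy
          rcases List.mem_cons.mp ha with ha | ha
          · subst ha
            exact hx y hy
          · exact hb a ha y (List.mem_cons_of_mem _ hy)
        · refine List.pairwise_cons.mpr ⟨?_, hq⟩
          intro b hbm
          rcases List.mem_cons.mp hbm with hbm | hbm
          · subst hbm
            constructor
            · exact hb b List.mem_cons_self x List.mem_cons_self
            · omega
          · rcases hp b hbm with ⟨h1, h2⟩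
            have := hb p List.mem_cons_self x List.mem_cons_self
            constructor <;> omega

-- on a merged list satisfying the invariant, A's bisect test is membership in some range
theorem inRanges_eq_contains (ms : List (Int × Int)) (mraw : List (List Int)) (n : Int)
    (hmap : mraw.map rowPair = ms)
    (hinv : List.Pairwise (fun a b => a.1 ≤ b.1 ∧ a.2 + 1 < b.1) ms) :
    inRangesA n mraw (ms.map (·.1)) = containsB ms n := by
  have hlenr : mraw.length = ms.length := by rw [← hmap]; simp
  have hms : ∀ (k : Nat) (hk : k < ms.length), ms[k] = rowPair (mraw[k]'(by omega)) := by
    intro k hk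
    subst hmap
    simp
  have hsorted : List.Pairwise (· ≤ ·) (ms.map (·.1)) := by
    rw [List.pairwise_map]
    exact hinv.imp (fun h => h.1)
  obtain ⟨hcle, hbefore, hafter⟩ := PySem.List.bisectRight_spec (ms.map (·.1)) n hsorted
  set c := PySem.List.bisectRight (ms.map (·.1)) n with hc
  simp only [List.length_map] at hcle hbefore hafter
  have hbefore' : ∀ (j : Nat) (hj : j < ms.length), j < c → ms[j].1 ≤ n := by
    intro j hj hjc
    have := hbefore j (by simpa using hj) hjc
    simpa using this
  have hafter' : ∀ (j : Nat) (hj : j < ms.length), c ≤ j → n < ms[j].1 := by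
    intro j hj hjc
    have := hafter j (by simpa using hj) hjc
    simpa using this
  rw [List.pairwise_iff_getElem] at hinv
  cases hc0 : c with
  | zero =>
    have hA : inRangesA n mraw (ms.map (·.1)) = false := by
      simp [inRangesA, ← hc, hc0]
    rw [hA]
    symm
    simp only [containsB]
    rw [List.any_eq_false]
    intro p hp
    obtain ⟨k, hk, hpk⟩ := List.mem_iff_getElem.mp hp
    have := hafter' k hk (by omega)
    subst hpk
    simp
    omega
  | succ c' =>
    have hc'lt : c' < ms.length := by omega
    have hget : PySem.List.pyGet? mraw ((c : Int) - 1) = some (mraw[c']'(by omega)) := by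
      have : (c : Int) - 1 = ((c' : Nat) : Int) := by omega
      rw [this, PySem.List.pyGet?_natCast]
      simp
    have hfst : ms[c'].1 ≤ n := hbefore' c' hc'lt (by omega)
    have hA : inRangesA n mraw (ms.map (·.1)) =
        (decide (ms[c'].1 ≤ n) && decide (n ≤ ms[c'].2)) := by
      simp only [inRangesA, ← hc]
      rw [if_pos (by omega), hget]
      rw [hms c' hc'lt]
      rfl
    rw [hA]
    by_cases hn : n ≤ ms[c'].2
    · have : containsB ms n = true := by
        simp only [containsB]; rw [List.any_eq_true]
        exact ⟨ms[c'], List.getElem_mem _, by simp [hfst, hn]⟩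
      rw [this]
      simp [hfst, hn]
    · have : containsB ms n = false := by
        simp only [containsB]; rw [List.any_eq_false]
        intro p hp
        obtain ⟨k, hk, hpk⟩ := List.mem_iff_getElem.mp hp
        subst hpk
        simp only [Bool.and_eq_true, decide_eq_true_eq, not_and, not_le]
        intro hk1
        rcases lt_trichotomy k c' with hlt | heq | hgt
        · have := (hinv k c' hk hc'lt hlt).2
          omega
        · subst heq; omega
        · have := hafter' k hk (by omega)
          omega
      rw [this]
      simp [hn]

theorem sum_ite_eq_filter_length (l : List Int) (p q : Int → Bool) (h : ∀ n, p n = q n) :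
    (l.map (fun n => if p n then (1 : Int) else 0)).sum = ((l.filter q).length : Int) := by
  induction l with
  | nil => simp
  | cons x xs ih =>
    simp only [h] at ih ⊢
    simp only [List.map_cons, List.sum_cons, List.filter_cons]
    cases q x
    · simp only [Bool.false_eq_true, ↓reduceIte]
      omega
    · simp only [↓reduceIte, List.length_cons]
      push_cast
      omega

-- ===== VERDICT (by name: the statement is the Claim_ definition above) =====
theorem solve_spec : Claim_equal_solve := by
  intro ranges ids _ hpre
  unfold Spec_solve
  obtain ⟨hne, _⟩ := hpre
  simp only [solve, solve_alt]
  cases hrs : PySem.List.sorted ranges (fun r => PySem.List.pyGetD r 0 0) with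
  | nil => exact absurd ((PySem.List.sorted_eq_nil_iff ranges _ _).mp hrs) hne
  | cons r0 rest =>
    have hfold : (rest.foldl mergeStepA [r0]).map rowPair
        = (r0 :: rest).foldl mergeStepB [] := by
      rw [List.foldl_cons]
      have h0 : mergeStepB [] r0 = [rowPair r0] := rfl
      rw [h0]
      simpa using mergeFold_corr rest [r0]
    set foldA := rest.foldl mergeStepA [r0] with hfa
    set foldB := (r0 :: rest).foldl mergeStepB [] with hfb
    have hmerged : foldA.reverse.map rowPair = foldB.reverse := by
      rw [List.map_reverse, hfold]
    have hsortedrs : List.Pairwise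
        (fun a b => PySem.List.pyGetD a 0 0 ≤ PySem.List.pyGetD b 0 0) (r0 :: rest) := by
      rw [← hrs]
      exact PySem.List.sorted_pairwise ranges _
    have hinvB : List.Pairwise (fun a b => a.1 ≤ b.1 ∧ a.2 + 1 < b.1) foldB.reverse := by
      rw [List.pairwise_reverse]
      exact mergeFold_inv (r0 :: rest) [] hsortedrs (by simp) (by simp)
    have hsp : foldA.reverse.map (fun r => PySem.List.pyGetD r 0 0)
        = foldB.reverse.map (·.1) := by
      rw [← hmerged, List.map_map]
      rfl
    dsimp only
    rw [Prod.mk.injEq]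
    refine ⟨?_, ?_⟩
    · rw [hsp]
      exact sum_ite_eq_filter_length ids _ _
        (fun n => inRanges_eq_contains foldB.reverse foldA.reverse n hmerged hinvB)
    · rw [← hmerged, List.map_map]
      rfl
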